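-- pv_equiv track=rewrite | github.com/RomitDeokar/Automated-Resume-Relevance-Check-System | enhanced_resume_system.py | _skills_similar
-- ===== SOURCE A (Python) =====
-- def _skills_similar(skill1: str, skill2: str) -> bool:
--     """Check if two skills are similar"""
--     similar_skills = {
--         'javascript': ['js', 'node', 'nodejs'],
--         'python': ['py', 'django', 'flask'],
--         'java': ['spring', 'springboot'],
--         'react': ['reactjs', 'react.js'],
--         'angular': ['angularjs', 'angular.js'],
--         'machine learning': ['ml', 'ai', 'artificial intelligence'],
--         'deep learning': ['dl', 'neural networks'],
--         'database': ['sql', 'mysql', 'postgresql', 'mongodb'],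
--         'cloud': ['aws', 'azure', 'gcp', 'google cloud']
--     }
--
--     for base_skill, variants in similar_skills.items():
--         if skill1 in [base_skill] + variants and skill2 in [base_skill] + variants:
--             return True
--
--     # Simple substring matching
--     if len(skill1) > 3 and len(skill2) > 3:
--         if skill1 in skill2 or skill2 in skill1:
--             return True
--
--     return False
-- ===== SOURCE B (Python) =====
-- def _build_index():
--     similar_skills = {
--         'javascript': ['js', 'node', 'nodejs'],
--         'python': ['py', 'django', 'flask'],
--         'java': ['spring', 'springboot'],
--         'react': ['reactjs', 'react.js'],
--         'angular': ['angularjs', 'angular.js'],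
--         'machine learning': ['ml', 'ai', 'artificial intelligence'],
--         'deep learning': ['dl', 'neural networks'],
--         'database': ['sql', 'mysql', 'postgresql', 'mongodb'],
--         'cloud': ['aws', 'azure', 'gcp', 'google cloud']
--     }
--     index = {}
--     for base, variants in similar_skills.items():
--         for token in [base] + variants:
--             index[token] = base
--     return index
--
--
-- _TOKEN_TO_GROUP = _build_index()
--
--
-- def _skills_similar(skill1: str, skill2: str) -> bool:
--     g1 = _TOKEN_TO_GROUP.get(skill1)
--     g2 = _TOKEN_TO_GROUP.get(skill2)
--     if g1 is not None and g1 == g2: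
--         return True
--     if len(skill1) > 3 and len(skill2) > 3 and (skill1 in skill2 or skill2 in skill1):
--         return True
--     return False
-- ===== Notes on version B (the rewrite author's own statement) =====
-- stated objective: simpler
-- what changed: Replaces the per-call scan over every synonym group by an inverted index (token -> group name) built once at module load, so the group test becomes two dict lookups and one comparison; the substring fallback is unchanged.
import Mathlib
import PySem

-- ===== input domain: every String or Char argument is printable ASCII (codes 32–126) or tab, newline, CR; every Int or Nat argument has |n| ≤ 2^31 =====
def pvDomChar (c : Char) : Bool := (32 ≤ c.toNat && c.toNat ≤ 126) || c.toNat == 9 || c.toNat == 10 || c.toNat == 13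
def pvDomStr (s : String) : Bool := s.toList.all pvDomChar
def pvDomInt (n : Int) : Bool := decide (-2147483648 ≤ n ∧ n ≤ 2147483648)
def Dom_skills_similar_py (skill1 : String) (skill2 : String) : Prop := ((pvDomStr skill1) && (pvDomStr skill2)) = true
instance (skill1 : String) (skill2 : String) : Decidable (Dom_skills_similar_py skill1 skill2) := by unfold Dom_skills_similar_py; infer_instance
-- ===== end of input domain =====

-- B replaces the per-call scan over the synonym groups by an inverted index (token -> group
-- name) built once, so the group test is two lookups; the substring fallback is unchanged (simpler).

-- The similar_skills dict, shared data of both sources (insertion order).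
def pvSimilarSkills : List (String × List String) :=
  [("javascript", ["js", "node", "nodejs"]),
   ("python", ["py", "django", "flask"]),
   ("java", ["spring", "springboot"]),
   ("react", ["reactjs", "react.js"]),
   ("angular", ["angularjs", "angular.js"]),
   ("machine learning", ["ml", "ai", "artificial intelligence"]),
   ("deep learning", ["dl", "neural networks"]),
   ("database", ["sql", "mysql", "postgresql", "mongodb"]),
   ("cloud", ["aws", "azure", "gcp", "google cloud"])]

-- ===== PORT A =====
-- the 'for base_skill, variants in similar_skills.items(): if skill1 in [base]+variants and skill2 in …: return True' loop
def pvLoopA : List (String × List String) → String → String → Bool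
  | [], _, _ => false
  | (b, vs) :: rest, s1, s2 =>
    if (b :: vs).contains s1 && (b :: vs).contains s2 then true
    else pvLoopA rest s1 s2

def skills_similar_py (skill1 : String) (skill2 : String) : Bool :=
  if pvLoopA pvSimilarSkills skill1 skill2 then true
  else if decide (3 < PySem.Str.len skill1) && decide (3 < PySem.Str.len skill2) then
    if PySem.Str.isIn skill1 skill2 || PySem.Str.isIn skill2 skill1 then true
    else false
  else false

-- ===== PORT B =====
-- index[token] = base for each token in [base] + variants, group by group (dict built once)
def pvIndex : PySem.Dict String String :=
  pvSimilarSkills.foldl (fun d p => (p.1 :: p.2).foldl (fun d t => d.insert t p.1) d)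
    PySem.Dict.empty

def skills_similar_py_alt (skill1 : String) (skill2 : String) : Bool :=
  let g1 := pvIndex.get? skill1
  let g2 := pvIndex.get? skill2
  if g1.isSome && g1 == g2 then true
  else if decide (3 < PySem.Str.len skill1) && decide (3 < PySem.Str.len skill2)
       && (PySem.Str.isIn skill1 skill2 || PySem.Str.isIn skill2 skill1) then true
  else false

-- ===== PRECONDITION & SPEC =====
def Spec_skills_similar_py (skill1 : String) (skill2 : String) (out : Bool) : Prop := out = skills_similar_py_alt skill1 skill2
instance (skill1 : String) (skill2 : String) (out : Bool) : Decidable (Spec_skills_similar_py skill1 skill2 out) := by unfold Spec_skills_similar_py; infer_instance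

-- ===== CLAIM (what is proved, stated in full; the proofs are below) =====
def Claim_equal_skills_similar_py : Prop := ∀ (skill1 : String) (skill2 : String), Dom_skills_similar_py skill1 skill2 → Spec_skills_similar_py skill1 skill2 (skills_similar_py skill1 skill2)

-- ===== LEMMAS AND PROOFS =====

-- all tokens of a group list
def pvToks (gs : List (String × List String)) : List String :=
  gs.flatMap (fun p => p.1 :: p.2)

-- first group (in list order) whose token set contains s
def pvLookFirst : List (String × List String) → String → Option String
  | [], _ => none
  | (b, vs) :: rest, s =>
    if (b :: vs).contains s then some b else pvLookFirst rest s

-- last group whose token set contains s (what repeated dict insertion yields)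
def pvLookLast : List (String × List String) → String → Option String
  | [], _ => none
  | (b, vs) :: rest, s =>
    match pvLookLast rest s with
    | some g => some g
    | none => if (b :: vs).contains s then some b else none

lemma pvToks_cons (b : String) (vs : List String) (rest : List (String × List String)) :
    pvToks ((b, vs) :: rest) = (b :: vs) ++ pvToks rest := by
  simp [pvToks]

lemma pvLoopA_of_not_mem_left (gs : List (String × List String)) (s1 s2 : String)
    (h : s1 ∉ pvToks gs) : pvLoopA gs s1 s2 = false := by
  induction gs with
  | nil => rfl
  | cons p rest ih =>
    obtain ⟨b, vs⟩ := p
    rw [pvToks_cons] at h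
    have hg : s1 ∉ (b :: vs) := fun hx => h (List.mem_append.mpr (Or.inl hx))
    have hr : s1 ∉ pvToks rest := fun hx => h (List.mem_append.mpr (Or.inr hx))
    simp [pvLoopA, List.contains_eq_mem, hg, ih hr]

lemma pvLoopA_of_not_mem_right (gs : List (String × List String)) (s1 s2 : String)
    (h : s2 ∉ pvToks gs) : pvLoopA gs s1 s2 = false := by
  induction gs with
  | nil => rfl
  | cons p rest ih =>
    obtain ⟨b, vs⟩ := p
    rw [pvToks_cons] at h
    have hg : s2 ∉ (b :: vs) := fun hx => h (List.mem_append.mpr (Or.inl hx))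
    have hr : s2 ∉ pvToks rest := fun hx => h (List.mem_append.mpr (Or.inr hx))
    simp [pvLoopA, List.contains_eq_mem, hg, ih hr]

lemma pvLookFirst_of_not_mem (gs : List (String × List String)) (s : String)
    (h : s ∉ pvToks gs) : pvLookFirst gs s = none := by
  induction gs with
  | nil => rfl
  | cons p rest ih =>
    obtain ⟨b, vs⟩ := p
    rw [pvToks_cons] at h
    have hg : s ∉ (b :: vs) := fun hx => h (List.mem_append.mpr (Or.inl hx))
    have hr : s ∉ pvToks rest := fun hx => h (List.mem_append.mpr (Or.inr hx))
    simp [pvLookFirst, List.contains_eq_mem, hg, ih hr]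

lemma pvLookLast_of_not_mem (gs : List (String × List String)) (s : String)
    (h : s ∉ pvToks gs) : pvLookLast gs s = none := by
  induction gs with
  | nil => rfl
  | cons p rest ih =>
    obtain ⟨b, vs⟩ := p
    rw [pvToks_cons] at h
    have hg : s ∉ (b :: vs) := fun hx => h (List.mem_append.mpr (Or.inl hx))
    have hr : s ∉ pvToks rest := fun hx => h (List.mem_append.mpr (Or.inr hx))
    simp [pvLookLast, List.contains_eq_mem, hg, ih hr]

lemma pvLookFirst_mem (gs : List (String × List String)) (s g : String)
    (h : pvLookFirst gs s = some g) : g ∈ pvToks gs := by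
  induction gs with
  | nil => simp [pvLookFirst] at h
  | cons p rest ih =>
    obtain ⟨b, vs⟩ := p
    rw [pvToks_cons]
    by_cases hc : s ∈ (b :: vs)
    · have hb : g = b := by
        simp [pvLookFirst, List.contains_eq_mem, hc] at h
        exact h.symm
      exact List.mem_append.mpr (Or.inl (by simp [hb]))
    · have h' : pvLookFirst rest s = some g := by
        simpa [pvLookFirst, List.contains_eq_mem, hc] using h
      exact List.mem_append.mpr (Or.inr (ih h'))

-- under disjointness of groups, first and last containing group coincide
lemma pvLookFirst_eq_last (gs : List (String × List String))
    (hn : (pvToks gs).Nodup) (s : String) : pvLookFirst gs s = pvLookLast gs s := by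
  induction gs with
  | nil => rfl
  | cons p rest ih =>
    obtain ⟨b, vs⟩ := p
    rw [pvToks_cons] at hn
    have hrest := List.Nodup.of_append_right hn
    have hdj := List.disjoint_of_nodup_append hn
    by_cases hc : s ∈ (b :: vs)
    · have hnm : s ∉ pvToks rest := fun hmem => hdj hc hmem
      have hlast := pvLookLast_of_not_mem rest s hnm
      simp [pvLookFirst, pvLookLast, List.contains_eq_mem, hc, hlast]
    · simp only [pvLookFirst, pvLookLast, List.contains_eq_mem]
      rw [ih hrest]
      cases h : pvLookLast rest s with
      | some g =>
        simp
        exact fun h' => absurd (List.mem_cons.mpr h') hc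
      | none => simp [hc]

-- A's loop equals comparing the first containing groups, under disjointness
lemma pvLoopA_eq_cmp (gs : List (String × List String))
    (hn : (pvToks gs).Nodup) (s1 s2 : String) :
    pvLoopA gs s1 s2 =
      ((pvLookFirst gs s1).isSome && (pvLookFirst gs s1 == pvLookFirst gs s2)) := by
  induction gs with
  | nil => rfl
  | cons p rest ih =>
    obtain ⟨b, vs⟩ := p
    rw [pvToks_cons] at hn
    have hrest := List.Nodup.of_append_right hn
    have hdj := List.disjoint_of_nodup_append hn
    by_cases h1 : s1 ∈ (b :: vs)
    · have hn1 : s1 ∉ pvToks rest := fun hm => hdj h1 hm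
      by_cases h2 : s2 ∈ (b :: vs)
      · simp [pvLoopA, pvLookFirst, List.contains_eq_mem, h1, h2]
      · have hloop := pvLoopA_of_not_mem_left rest s1 s2 hn1
        rw [show pvLoopA ((b, vs) :: rest) s1 s2 = false by
          simp [pvLoopA, List.contains_eq_mem, h2, hloop]]
        simp only [pvLookFirst, List.contains_eq_mem, h1, h2]
        cases hf : pvLookFirst rest s2 with
        | none => simp
        | some g =>
          have hg := pvLookFirst_mem rest s2 g hf
          have hb : b ∈ (b :: vs) := by simp
          have hne : b ≠ g := fun he => hdj hb (he ▸ hg)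
          simp [hne]
    · by_cases h2 : s2 ∈ (b :: vs)
      · have hn2 : s2 ∉ pvToks rest := fun hm => hdj h2 hm
        have hloop := pvLoopA_of_not_mem_right rest s1 s2 hn2
        have hf2 := pvLookFirst_of_not_mem rest s2 hn2
        rw [show pvLoopA ((b, vs) :: rest) s1 s2 = false by
          simp [pvLoopA, List.contains_eq_mem, h1, hloop]]
        simp only [pvLookFirst, List.contains_eq_mem, h1, h2, hf2]
        cases hf : pvLookFirst rest s1 with
        | none => simp
        | some g =>
          have hg := pvLookFirst_mem rest s1 g hf
          have hb : b ∈ (b :: vs) := by simp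
          have hne : g ≠ b := fun he => hdj hb (he ▸ hg)
          simp [hne]
      · simp [pvLoopA, pvLookFirst, List.contains_eq_mem, h1, h2, ih hrest]

-- one group's inner insert fold: every token maps to the base b
lemma pvGet_innerFold (l : List String) (b : String) (d : PySem.Dict String String)
    (s : String) :
    ((l.foldl (fun d t => d.insert t b) d).get? s)
      = if s ∈ l then some b else d.get? s := by
  induction l generalizing d with
  | nil => simp
  | cons t ts ih =>
    rw [List.foldl_cons, ih]
    by_cases hm : s ∈ ts
    · simp [hm]
    · by_cases hst : s = t
      · subst hst
        simp [hm, PySem.Dict.get?_insert_self]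
      · simp [hm, hst, PySem.Dict.get?_insert_of_ne _ _ hst]

-- the built index looks up the LAST group containing s (later inserts overwrite)
lemma pvGet_build (gs : List (String × List String)) (d : PySem.Dict String String)
    (s : String) :
    ((gs.foldl (fun d p => (p.1 :: p.2).foldl (fun d t => d.insert t p.1) d) d).get? s)
      = match pvLookLast gs s with
        | some g => some g
        | none => d.get? s := by
  induction gs generalizing d with
  | nil => rfl
  | cons p rest ih =>
    obtain ⟨b, vs⟩ := p
    rw [List.foldl_cons, ih]
    simp only [pvLookLast]
    cases h : pvLookLast rest s with
    | some g => simp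
    | none =>
      simp only
      rw [pvGet_innerFold]
      by_cases hc : s ∈ (b :: vs)
      · simp [List.contains_eq_mem, hc]
      · simp [List.contains_eq_mem, hc]

lemma pvIndex_get (s : String) : pvIndex.get? s = pvLookLast pvSimilarSkills s := by
  unfold pvIndex
  rw [pvGet_build]
  cases h : pvLookLast pvSimilarSkills s <;> simp [PySem.Dict.get?_empty]

lemma pvNodup : (pvToks pvSimilarSkills).Nodup := by decide

-- ===== VERDICT (by name: the statement is the Claim_ definition above) =====
theorem skills_similar_py_spec : Claim_equal_skills_similar_py := by
  intro s1 s2 _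
  unfold Spec_skills_similar_py skills_similar_py skills_similar_py_alt
  rw [pvIndex_get, pvIndex_get, ← pvLookFirst_eq_last _ pvNodup,
      ← pvLookFirst_eq_last _ pvNodup, pvLoopA_eq_cmp _ pvNodup]
  cases hg : ((pvLookFirst pvSimilarSkills s1).isSome
      && (pvLookFirst pvSimilarSkills s1 == pvLookFirst pvSimilarSkills s2))
  · by_cases hl1 : 3 < PySem.Str.len s1
    · by_cases hl2 : 3 < PySem.Str.len s2
      · simp [hg, hl1, hl2]
      · simp [hg, hl2]
    · simp [hg, hl1]
  · simp [hg]
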